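-- pv_equiv track=rewrite | github.com/jihye0420/TIL_Algorithm | Programmers_Python/Lv.1/음양 더하기.py | solution
-- ===== SOURCE A (Python) =====
-- def solution(absolutes, signs):
--     answer = 0
--
--     for a, s in zip(absolutes, signs):
--         if s == True:
--             answer += a
--         else:
--             answer -= a
--
--     return answer
-- ===== SOURCE B (Python) =====
-- def solution(absolutes, signs):
--     total = sum(a for a, s in zip(absolutes, signs))
--     neg = sum(a for a, s in zip(absolutes, signs) if not s)
--     return total - 2 * neg
-- ===== Notes on version B (the rewrite author's own statement) =====
-- stated objective: alternative
-- what changed: Replaced the per-element add/subtract branch by two branch-free sums over the zipped pairs (total and sum of negatives) combined as total - 2*neg.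
import Mathlib
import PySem

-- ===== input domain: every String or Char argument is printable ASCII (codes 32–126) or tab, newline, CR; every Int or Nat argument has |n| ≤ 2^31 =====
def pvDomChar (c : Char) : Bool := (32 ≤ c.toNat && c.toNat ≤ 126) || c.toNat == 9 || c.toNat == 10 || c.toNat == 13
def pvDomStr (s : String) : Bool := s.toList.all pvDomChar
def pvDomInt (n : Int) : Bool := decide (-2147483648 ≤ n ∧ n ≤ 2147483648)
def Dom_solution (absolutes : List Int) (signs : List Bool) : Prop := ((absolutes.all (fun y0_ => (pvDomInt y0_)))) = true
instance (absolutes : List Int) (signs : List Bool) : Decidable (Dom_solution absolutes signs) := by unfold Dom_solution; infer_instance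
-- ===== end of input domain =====

-- ===== PORT A =====
-- A: one fold over zip, add or subtract per element depending on the sign.
def solution (absolutes : List Int) (signs : List Bool) : Int :=
  (List.zip absolutes signs).foldl
    (fun answer p => if p.2 == true then answer + p.1 else answer - p.1) 0

-- ===== PORT B =====
-- B: two branch-free sums over the zipped pairs, combined as total - 2*neg.
def solution_alt (absolutes : List Int) (signs : List Bool) : Int :=
  let total := ((List.zip absolutes signs).map (fun p => p.1)).sum
  let neg := (((List.zip absolutes signs).filter (fun p => !p.2)).map (fun p => p.1)).sum
  total - 2 * neg

-- ===== PRECONDITION & SPEC =====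
def Spec_solution (absolutes : List Int) (signs : List Bool) (out : Int) : Prop := out = solution_alt absolutes signs
instance (absolutes : List Int) (signs : List Bool) (out : Int) : Decidable (Spec_solution absolutes signs out) := by unfold Spec_solution; infer_instance

-- ===== CLAIM (what is proved, stated in full; the proofs are below) =====
def Claim_equal_solution : Prop := ∀ (absolutes : List Int) (signs : List Bool), Dom_solution absolutes signs → Spec_solution absolutes signs (solution absolutes signs)

-- ===== LEMMAS AND PROOFS =====

-- ===== VERDICT (by name: the statement is the Claim_ definition above) =====
-- loop invariant: the fold starting from acc equals acc + (total - 2*neg) of the pair list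
theorem fold_eq (l : List (Int × Bool)) (acc : Int) :
    l.foldl (fun answer p => if p.2 == true then answer + p.1 else answer - p.1) acc
      = acc + (l.map (fun p => p.1)).sum - 2 * ((l.filter (fun p => !p.2)).map (fun p => p.1)).sum := by
  induction l generalizing acc with
  | nil => simp
  | cons h t ih =>
    rw [List.foldl_cons, ih]
    obtain ⟨a, s⟩ := h
    cases s <;> simp <;> ring

theorem solution_spec : Claim_equal_solution := by
  intro absolutes signs _
  unfold Spec_solution solution solution_alt
  rw [fold_eq]
  simp
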